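-- pv_equiv track=rewrite | github.com/dfattoni1/Customer_segmentation_unsupervised_learning | util.py | count_languages
-- ===== SOURCE A (Python) =====
-- def count_languages(row):
--     num_languages = 0
--     languages = row.split(", ")
--     for i in languages:
--         if i != "c++":
--             num_languages += 1
--         else:
--             continue
--     return num_languages
-- ===== SOURCE B (Python) =====
-- def count_languages(row):
--     i = row.find(", ")
--     if i == -1:
--         return 1 if row != "c++" else 0
--     head = row[:i]
--     return (1 if head != "c++" else 0) + count_languages(row[i + 2:])
-- ===== Notes on version B (the rewrite author's own statement) =====
-- stated objective: alternative
-- what changed: B never builds the split list: it recursively consumes the string, locating each ", " separator with find, scoring the head token and recursing on the remainder, instead of A's loop over the list produced by split.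
import Mathlib
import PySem

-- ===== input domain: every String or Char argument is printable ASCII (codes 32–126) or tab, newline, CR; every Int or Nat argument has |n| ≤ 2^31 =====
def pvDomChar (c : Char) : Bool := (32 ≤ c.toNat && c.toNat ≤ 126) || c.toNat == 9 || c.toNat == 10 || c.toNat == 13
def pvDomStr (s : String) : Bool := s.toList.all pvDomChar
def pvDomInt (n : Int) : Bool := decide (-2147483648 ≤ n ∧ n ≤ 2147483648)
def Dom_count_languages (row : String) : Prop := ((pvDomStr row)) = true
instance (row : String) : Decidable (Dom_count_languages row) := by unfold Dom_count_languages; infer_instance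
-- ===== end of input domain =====

-- B recursively consumes the string with find/slicing instead of looping over the list built by split: an alternative decomposition, same cost.

-- ===== PORT A =====
def count_languages (row : String) : Int :=
  ((PySem.Chars.splitOn row.toList ", ".toList).map String.mk).foldl
    (fun num_languages i => if i != "c++" then num_languages + 1 else num_languages) 0

-- ===== PORT B =====
-- termination helper for the port: consuming past the found ", " strictly shrinks the string
theorem pvFindDropLt (s : List Char) (h : ¬ PySem.Chars.find s ", ".toList = -1) :
    (PySem.List.slice s (some (PySem.Chars.find s ", ".toList + 2)) none).length < s.length := by
  have hinf : ", ".toList <:+: s := by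
    by_contra hc
    exact h ((PySem.Chars.find_eq_neg_one_iff s ", ".toList).mpr hc)
  have hnn : 0 ≤ PySem.Chars.find s ", ".toList :=
    (PySem.Chars.find_nonneg_iff s ", ".toList).mpr hinf
  have hpre := (PySem.Chars.find_spec hnn).1
  have hlen : 2 ≤ (List.drop (PySem.Chars.find s ", ".toList).toNat s).length := by
    simpa using hpre.length_le
  rw [PySem.List.slice_from s (by omega)]
  simp only [List.length_drop] at hlen ⊢
  omega

def count_languages_alt_go (s : List Char) : Int :=
  let i := PySem.Chars.find s ", ".toList
  if h : i = -1 then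
    (if String.mk s ≠ "c++" then 1 else 0)
  else
    (if String.mk (PySem.List.slice s none (some i)) ≠ "c++" then 1 else 0)
      + count_languages_alt_go (PySem.List.slice s (some (i + 2)) none)
termination_by s.length
decreasing_by exact pvFindDropLt s h

def count_languages_alt (row : String) : Int := count_languages_alt_go row.toList

-- ===== PRECONDITION & SPEC =====
def Spec_count_languages (row : String) (out : Int) : Prop := out = count_languages_alt row
instance (row : String) (out : Int) : Decidable (Spec_count_languages row out) := by unfold Spec_count_languages; infer_instance

-- ===== CLAIM (what is proved, stated in full; the proofs are below) =====
def Claim_equal_count_languages : Prop := ∀ (row : String), Dom_count_languages row → Spec_count_languages row (count_languages row)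

-- ===== LEMMAS AND PROOFS =====

-- step equations of PySem.Chars.splitOn.go
theorem pvGoZero (sep l cur : List Char) (acc : List (List Char)) :
    PySem.Chars.splitOn.go sep 0 l cur acc = ((cur.reverse ++ l) :: acc).reverse := rfl

theorem pvGoSuccNil (sep cur : List Char) (f : Nat) (acc : List (List Char)) :
    PySem.Chars.splitOn.go sep (f + 1) [] cur acc = (cur.reverse :: acc).reverse := rfl

theorem pvGoSuccCons (sep : List Char) (f : Nat) (c : Char) (rest cur : List Char)
    (acc : List (List Char)) :
    PySem.Chars.splitOn.go sep (f + 1) (c :: rest) cur acc =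
      if sep.isPrefixOf (c :: rest) then
        PySem.Chars.splitOn.go sep f ((c :: rest).drop sep.length) [] (cur.reverse :: acc)
      else
        PySem.Chars.splitOn.go sep f rest (c :: cur) acc := rfl

-- the accumulator is only ever appended in front, reversed
theorem pvGoAcc (sep : List Char) (f : Nat) :
    ∀ (l cur : List Char) (acc : List (List Char)),
      PySem.Chars.splitOn.go sep f l cur acc =
        acc.reverse ++ PySem.Chars.splitOn.go sep f l cur [] := by
  induction f with
  | zero => intro l cur acc; simp [pvGoZero]
  | succ f ih =>
    intro l cur acc
    match l with
    | [] => simp [pvGoSuccNil]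
    | c :: rest =>
      rw [pvGoSuccCons, pvGoSuccCons]
      by_cases hp : sep.isPrefixOf (c :: rest)
      · rw [if_pos hp, if_pos hp, ih _ [] (cur.reverse :: acc), ih _ [] ([cur.reverse])]
        simp
      · rw [if_neg hp, if_neg hp, ih rest (c :: cur) acc]

-- no occurrence of sep: a single piece comes out
theorem pvGoNoOcc (sep : List Char) :
    ∀ (l : List Char), ¬ sep <:+: l →
      ∀ (f : Nat) (cur : List Char) (acc : List (List Char)), l.length < f →
        PySem.Chars.splitOn.go sep f l cur acc = acc.reverse ++ [cur.reverse ++ l] := by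
  intro l
  induction l with
  | nil =>
    intro _ f cur acc hf
    match f, hf with
    | f + 1, _ => simp [pvGoSuccNil]
  | cons c rest ih =>
    intro hocc f cur acc hf
    match f, hf with
    | f + 1, hf =>
      rw [pvGoSuccCons]
      have hp : ¬ sep.isPrefixOf (c :: rest) = true := by
        intro hp
        exact hocc (List.isPrefixOf_iff_prefix.mp hp).isInfix
      rw [if_neg hp]
      have hocc' : ¬ sep <:+: rest := fun hi => hocc (hi.trans (List.suffix_cons c rest).isInfix)
      rw [ih hocc' f (c :: cur) acc (by simpa using Nat.lt_of_succ_lt_succ hf)]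
      simp

-- advance over the first i non-matching positions, then flush at the first occurrence
theorem pvGoAdvance (sep : List Char) :
    ∀ (i : Nat) (l : List Char) (f : Nat) (cur : List Char) (acc : List (List Char)),
      i < f → sep <+: l.drop i → (∀ j, j < i → ¬ sep <+: l.drop j) → sep ≠ [] →
      PySem.Chars.splitOn.go sep f l cur acc =
        PySem.Chars.splitOn.go sep (f - (i + 1)) (l.drop (i + sep.length)) []
          ((cur.reverse ++ l.take i) :: acc) := by
  intro i
  induction i with
  | zero =>
    intro l f cur acc hf hpre _ hsep
    simp only [List.drop_zero] at hpre
    match l, hpre, hsep with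
    | [], hpre, hsep => exact absurd (List.prefix_nil.mp hpre) hsep
    | c :: rest, hpre, hsep =>
      match f, hf with
      | f + 1, _ =>
        rw [pvGoSuccCons, if_pos (List.isPrefixOf_iff_prefix.mpr hpre)]
        simp
  | succ i ih =>
    intro l f cur acc hf hpre hmin hsep
    match l with
    | [] =>
      rw [List.drop_nil] at hpre
      exact absurd (List.prefix_nil.mp hpre) hsep
    | c :: rest =>
      match f, hf with
      | f + 1, hf =>
        have hp : ¬ sep.isPrefixOf (c :: rest) = true := by
          intro hp
          exact hmin 0 (Nat.succ_pos i) (by simpa using List.isPrefixOf_iff_prefix.mp hp)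
        rw [pvGoSuccCons, if_neg hp]
        rw [ih rest f (c :: cur) acc (Nat.lt_of_succ_lt_succ hf)
          (by simpa using hpre)
          (fun j hj => by simpa using hmin (j + 1) (Nat.succ_lt_succ hj)) hsep]
        have e1 : f + 1 - (i + 1 + 1) = f - (i + 1) := by omega
        have e2 : (c :: rest).drop (i + 1 + sep.length) = rest.drop (i + sep.length) := by
          have h : i + 1 + sep.length = (i + sep.length) + 1 := by omega
          rw [h, List.drop_succ_cons]
        have e3 : cur.reverse ++ (c :: rest).take (i + 1) = (c :: cur).reverse ++ rest.take i := by
          simp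
        rw [e1, e2, e3]

-- enough fuel makes the result fuel-independent
theorem pvGoFuel (sep : List Char) (hsep : sep ≠ []) :
    ∀ (n : Nat) (l : List Char), l.length ≤ n →
      ∀ (f f' : Nat) (cur : List Char) (acc : List (List Char)),
        l.length < f → l.length < f' →
        PySem.Chars.splitOn.go sep f l cur acc = PySem.Chars.splitOn.go sep f' l cur acc := by
  intro n
  induction n with
  | zero =>
    intro l hl f f' cur acc hf hf'
    match l, hl with
    | [], _ =>
      match f, hf, f', hf' with
      | f + 1, _, f' + 1, _ => rw [pvGoSuccNil, pvGoSuccNil]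
  | succ n ih =>
    intro l hl f f' cur acc hf hf'
    match l with
    | [] =>
      match f, hf, f', hf' with
      | f + 1, _, f' + 1, _ => rw [pvGoSuccNil, pvGoSuccNil]
    | c :: rest =>
      match f, hf, f', hf' with
      | f + 1, hf, f' + 1, hf' =>
        rw [pvGoSuccCons, pvGoSuccCons]
        have hs1 : 1 ≤ sep.length := Nat.one_le_iff_ne_zero.mpr (by simpa using hsep)
        simp only [List.length_cons] at hl hf hf'
        have hdl : ((c :: rest).drop sep.length).length = rest.length + 1 - sep.length := by
          simp [List.length_drop]
        by_cases hp : sep.isPrefixOf (c :: rest)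
        · rw [if_pos hp, if_pos hp]
          exact ih ((c :: rest).drop sep.length) (by rw [hdl]; omega) f f' []
            (cur.reverse :: acc) (by rw [hdl]; omega) (by rw [hdl]; omega)
        · rw [if_neg hp, if_neg hp]
          exact ih rest (by omega) f f' (c :: cur) acc (by omega) (by omega)

-- the recurrence splitOn satisfies, phrased through find
theorem pvSplitOnRec (sep : List Char) (hsep : sep ≠ []) (s : List Char) :
    PySem.Chars.splitOn s sep =
      if PySem.Chars.find s sep = -1 then [s]
      else s.take (PySem.Chars.find s sep).toNat ::
        PySem.Chars.splitOn (s.drop ((PySem.Chars.find s sep).toNat + sep.length)) sep := by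
  by_cases hneg : PySem.Chars.find s sep = -1
  · rw [if_pos hneg]
    have hocc : ¬ sep <:+: s := (PySem.Chars.find_eq_neg_one_iff s sep).mp hneg
    show PySem.Chars.splitOn.go sep (s.length + 1) s [] [] = [s]
    rw [pvGoNoOcc sep s hocc (s.length + 1) [] [] (Nat.lt_succ_self _)]
    simp
  · rw [if_neg hneg]
    have hinf : sep <:+: s := by
      by_contra hc
      exact hneg ((PySem.Chars.find_eq_neg_one_iff s sep).mpr hc)
    have hnn : 0 ≤ PySem.Chars.find s sep := (PySem.Chars.find_nonneg_iff s sep).mpr hinf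
    obtain ⟨hpre, hmin⟩ := PySem.Chars.find_spec hnn
    set i : Nat := (PySem.Chars.find s sep).toNat with hi
    have hs1 : 1 ≤ sep.length := Nat.one_le_iff_ne_zero.mpr (by simpa using hsep)
    have hilen : i + sep.length ≤ s.length := by
      have := hpre.length_le
      simp only [List.length_drop] at this
      omega
    show PySem.Chars.splitOn.go sep (s.length + 1) s [] [] = _
    rw [pvGoAdvance sep i s (s.length + 1) [] [] (by omega) hpre hmin hsep]
    rw [pvGoAcc]
    have hdl : (s.drop (i + sep.length)).length = s.length - (i + sep.length) := by
      simp [List.length_drop]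
    rw [pvGoFuel sep hsep (s.drop (i + sep.length)).length (s.drop (i + sep.length)) le_rfl
      (s.length + 1 - (i + 1)) ((s.drop (i + sep.length)).length + 1) [] []
      (by omega) (by omega)]
    simp [PySem.Chars.splitOn]

-- B's recursion computes A's filtered count of the split pieces
theorem pvAltGoCount (n : Nat) :
    ∀ s : List Char, s.length ≤ n →
      count_languages_alt_go s =
        (((PySem.Chars.splitOn s ", ".toList).map String.mk).countP
          (fun i => i != "c++") : Int) := by
  induction n with
  | zero =>
    intro s hs
    match s, hs with
    | [], _ =>
      rw [count_languages_alt_go, dif_pos (by decide)]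
      have h0 : PySem.Chars.splitOn ([] : List Char) ", ".toList = [[]] := rfl
      rw [h0]
      decide
  | succ n ih =>
    intro s hs
    rw [count_languages_alt_go]
    rw [pvSplitOnRec ", ".toList (by decide) s]
    by_cases hneg : PySem.Chars.find s ", ".toList = -1
    · rw [dif_pos hneg, if_pos hneg]
      by_cases hc : String.mk s = "c++"
      · simp [hc]
      · simp [hc]
    · rw [dif_neg hneg, if_neg hneg]
      have hinf : ", ".toList <:+: s := by
        by_contra hc
        exact hneg ((PySem.Chars.find_eq_neg_one_iff s ", ".toList).mpr hc)
      have hnn : 0 ≤ PySem.Chars.find s ", ".toList :=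
        (PySem.Chars.find_nonneg_iff s ", ".toList).mpr hinf
      have hpre := (PySem.Chars.find_spec hnn).1
      have hlen2 : 2 ≤ (List.drop (PySem.Chars.find s ", ".toList).toNat s).length := by
        simpa using hpre.length_le
      set iZ : Int := PySem.Chars.find s ", ".toList with hiZ
      have htn : (iZ + 2).toNat = iZ.toNat + 2 := by omega
      have hslice1 : PySem.List.slice s none (some iZ) = s.take iZ.toNat :=
        PySem.List.slice_to s hnn
      have hslice2 : PySem.List.slice s (some (iZ + 2)) none = s.drop (iZ.toNat + 2) := by
        rw [PySem.List.slice_from s (by omega), htn]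
      have hrec : (s.drop (iZ.toNat + 2)).length ≤ n := by
        simp only [List.length_drop] at hlen2 ⊢
        omega
      have hseplen : (", ".toList).length = 2 := by decide
      rw [hseplen, hslice1, hslice2, ih _ hrec]
      simp only [List.map_cons, List.countP_cons]
      by_cases hc : String.mk (s.take iZ.toNat) = "c++"
      · simp [hc]
      · simp [hc]
        omega

-- ===== VERDICT (by name: the statement is the Claim_ definition above) =====
theorem count_languages_spec : Claim_equal_count_languages := by
  intro row _
  unfold Spec_count_languages count_languages count_languages_alt
  rw [PySem.List.foldl_count_if (fun i => i != "c++")]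
  rw [pvAltGoCount row.toList.length row.toList le_rfl]
  simp
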